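-- pv_equiv track=rewrite | github.com/vladyslavdushko/ziks_lab4 | crypto_analysis.py | score_decrypted_text
-- ===== SOURCE A (Python) =====
-- from collections import Counter
--
-- def count_ngrams(text, n):
--     """
--     Підраховує кількість n-грам в тексті.
--     """
--     ngrams = [text[i:i+n] for i in range(len(text)-n+1)]
--     return Counter(ngrams)
--
-- def score_decrypted_text(decrypted_text, known_words, bigram_freq, trigram_freq):
--     """
--     Оцінює розшифрований текст на основі наявності відомих слів та відповідності біграм і триграм.
--     """
--     score = 0
--     # Перевірка наявності відомих слів
--     for word in known_words:
--         if word in decrypted_text: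
--             score += 1
--     # Аналіз біграм
--     decrypted_bigrams = count_ngrams(decrypted_text.replace(' ', ''), 2)
--     for bg in decrypted_bigrams:
--         if bg in bigram_freq:
--             score += bigram_freq[bg]
--     # Аналіз триграм
--     decrypted_trigrams = count_ngrams(decrypted_text.replace(' ', ''), 3)
--     for tg in decrypted_trigrams:
--         if tg in trigram_freq:
--             score += trigram_freq[tg]
--     return score
-- ===== SOURCE B (Python) =====
-- def score_decrypted_text(decrypted_text, known_words, bigram_freq, trigram_freq):
--     stripped = decrypted_text.replace(' ', '')
--     score = sum(w in decrypted_text for w in known_words)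
--     for k, v in bigram_freq.items():
--         if len(k) == 2 and k in stripped:
--             score += v
--     for k, v in trigram_freq.items():
--         if len(k) == 3 and k in stripped:
--             score += v
--     return score
-- ===== Notes on version B (the rewrite author's own statement) =====
-- stated objective: alternative
-- what changed: B never enumerates or counts the text's ngrams: it iterates the frequency tables and, for each key of the right length, does one substring search in the stripped text (a distinct bigram/trigram of the text is exactly a length-2/3 substring), replacing A's Counter-of-all-ngrams plus per-ngram dict lookups.
import Mathlib
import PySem

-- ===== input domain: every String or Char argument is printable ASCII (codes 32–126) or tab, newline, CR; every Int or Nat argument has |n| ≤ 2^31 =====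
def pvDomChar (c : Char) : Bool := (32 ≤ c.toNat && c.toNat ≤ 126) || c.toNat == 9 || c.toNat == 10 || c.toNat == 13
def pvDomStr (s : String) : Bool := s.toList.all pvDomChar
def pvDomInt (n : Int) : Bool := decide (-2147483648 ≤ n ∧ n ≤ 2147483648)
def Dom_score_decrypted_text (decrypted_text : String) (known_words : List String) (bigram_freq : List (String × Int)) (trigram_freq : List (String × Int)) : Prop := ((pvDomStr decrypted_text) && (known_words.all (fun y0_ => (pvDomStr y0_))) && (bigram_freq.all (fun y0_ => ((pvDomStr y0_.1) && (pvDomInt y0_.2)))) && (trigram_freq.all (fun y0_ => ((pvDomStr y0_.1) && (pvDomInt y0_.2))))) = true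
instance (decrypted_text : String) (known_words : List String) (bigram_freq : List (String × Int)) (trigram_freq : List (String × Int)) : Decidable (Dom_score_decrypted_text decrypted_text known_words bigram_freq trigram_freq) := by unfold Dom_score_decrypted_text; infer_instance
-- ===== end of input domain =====

-- ===== PORT A =====
-- B never enumerates the text's ngrams: it scans each frequency table and does one substring
-- search in the stripped text per key of the right length, instead of A's Counter of all
-- ngrams with per-ngram dict lookups (objective: alternative, same order of cost).
-- count_ngrams(text, n): Counter of all length-n slices of text
def pvCountNgrams (text : String) (n : Int) : PySem.Dict String Int :=
  let ngrams := (PySem.List.pyRange 0 ((PySem.Str.len text : Int) - n + 1) 1).map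
      (fun i => PySem.Str.slice text (some i) (some (i + n)))
  PySem.Dict.counter ngrams

def score_decrypted_text (decrypted_text : String) (known_words : List String) (bigram_freq : List (String × Int)) (trigram_freq : List (String × Int)) : Int :=
  let score : Int := known_words.foldl
    (fun sc w => if PySem.Str.isIn w decrypted_text then sc + 1 else sc) 0
  let decrypted_bigrams := pvCountNgrams (PySem.Str.replace decrypted_text " " "") 2
  let score := decrypted_bigrams.keys.foldl
    (fun sc bg => if (PySem.Dict.mk bigram_freq).contains bg
                  then sc + (PySem.Dict.mk bigram_freq).getD bg 0 else sc) score
  let decrypted_trigrams := pvCountNgrams (PySem.Str.replace decrypted_text " " "") 3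
  let score := decrypted_trigrams.keys.foldl
    (fun sc tg => if (PySem.Dict.mk trigram_freq).contains tg
                  then sc + (PySem.Dict.mk trigram_freq).getD tg 0 else sc) score
  score

-- ===== PORT B =====
def score_decrypted_text_alt (decrypted_text : String) (known_words : List String) (bigram_freq : List (String × Int)) (trigram_freq : List (String × Int)) : Int :=
  let stripped := PySem.Str.replace decrypted_text " " ""
  let score : Int := (known_words.countP (fun w => PySem.Str.isIn w decrypted_text) : Nat)
  let score := bigram_freq.foldl
    (fun sc p => if PySem.Str.len p.1 == 2 && PySem.Str.isIn p.1 stripped then sc + p.2 else sc) score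
  let score := trigram_freq.foldl
    (fun sc p => if PySem.Str.len p.1 == 3 && PySem.Str.isIn p.1 stripped then sc + p.2 else sc) score
  score

-- ===== PRECONDITION & SPEC =====
-- Pre_ excludes association lists with duplicate keys: they do not represent any Python dict
-- (A's bigram_freq/trigram_freq are dicts, which cannot hold duplicate keys), and on them
-- first-match lookup (A) vs per-entry accumulation (B) is an arbitrary choice.
def Pre_score_decrypted_text (decrypted_text : String) (known_words : List String) (bigram_freq : List (String × Int)) (trigram_freq : List (String × Int)) : Prop :=
  (bigram_freq.map Prod.fst).Nodup ∧ (trigram_freq.map Prod.fst).Nodup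
instance (decrypted_text : String) (known_words : List String) (bigram_freq : List (String × Int)) (trigram_freq : List (String × Int)) : Decidable (Pre_score_decrypted_text decrypted_text known_words bigram_freq trigram_freq) := by unfold Pre_score_decrypted_text; infer_instance

def pvWitness_score_decrypted_text : String × List String × (List (String × Int)) × (List (String × Int)) :=
  ("the cat", ["cat", "dog"], [("th", 3), ("he", 2)], [("the", 5)])

def Spec_score_decrypted_text (decrypted_text : String) (known_words : List String) (bigram_freq : List (String × Int)) (trigram_freq : List (String × Int)) (out : Int) : Prop := out = score_decrypted_text_alt decrypted_text known_words bigram_freq trigram_freq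
instance (decrypted_text : String) (known_words : List String) (bigram_freq : List (String × Int)) (trigram_freq : List (String × Int)) (out : Int) : Decidable (Spec_score_decrypted_text decrypted_text known_words bigram_freq trigram_freq out) := by unfold Spec_score_decrypted_text; infer_instance

-- ===== CLAIM (what is proved, stated in full; the proofs are below) =====
def Claim_equal_score_decrypted_text : Prop := ∀ (decrypted_text : String) (known_words : List String) (bigram_freq : List (String × Int)) (trigram_freq : List (String × Int)), Dom_score_decrypted_text decrypted_text known_words bigram_freq trigram_freq → Pre_score_decrypted_text decrypted_text known_words bigram_freq trigram_freq → Spec_score_decrypted_text decrypted_text known_words bigram_freq trigram_freq (score_decrypted_text decrypted_text known_words bigram_freq trigram_freq)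

-- ===== LEMMAS AND PROOFS =====

-- sum of p.2 over entries of P with key x is 0 when x is not a key of P
lemma pv_sum_eq_key_zero (P : List (String × Int)) (x : String)
    (hx : x ∉ P.map Prod.fst) :
    (P.map (fun p => if p.1 = x then p.2 else 0)).sum = 0 := by
  induction P with
  | nil => simp
  | cons q P ih =>
    simp only [List.map_cons, List.sum_cons, List.mem_cons, not_or] at hx ⊢
    rw [if_neg (fun h => hx.1 h.symm), ih hx.2, add_zero]

-- with nodup keys, the sum over entries with key x is the first-match lookup (0 if absent)
lemma pv_sum_eq_key (P : List (String × Int)) (x : String)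
    (hP : (P.map Prod.fst).Nodup) :
    (P.map (fun p => if p.1 = x then p.2 else 0)).sum
      = if (PySem.Dict.mk P).contains x then (PySem.Dict.mk P).getD x 0 else 0 := by
  induction P with
  | nil => simp [PySem.Dict.contains]
  | cons q P ih =>
    simp only [List.map_cons, List.nodup_cons] at hP
    simp only [List.map_cons, List.sum_cons]
    by_cases hq : q.1 = x
    · subst hq
      rw [if_pos rfl, pv_sum_eq_key_zero P q.1 hP.1, add_zero]
      simp [PySem.Dict.contains, PySem.Dict.getD, PySem.Dict.get?]
    · rw [if_neg hq, zero_add, ih hP.2]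
      have hb : (q.1 == x) = false := beq_eq_false_iff_ne.mpr hq
      simp only [PySem.Dict.contains, PySem.Dict.getD, PySem.Dict.get?, List.any_cons,
        hb, Bool.false_or]
      have hfind : List.find? (fun p : String × Int => p.1 == x) (q :: P)
          = List.find? (fun p => p.1 == x) P := by
        simp [hb]
      rw [hfind]

-- a filtered sum over P equals the pointwise if-sum
lemma pv_filter_sum (P : List (String × Int)) (q : String → Bool) :
    ((P.filter (fun p => q p.1)).map Prod.snd).sum
      = (P.map (fun p => if q p.1 then p.2 else 0)).sum := by
  induction P with
  | nil => simp
  | cons a P ih =>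
    by_cases h : q a.1 <;> simp [h, ih]

-- A's fold over the distinct ngrams S with dict lookups in P equals
-- the sum over P of the entries whose key lies in S (S nodup, P keys nodup)
lemma pv_main (S : List String) (P : List (String × Int)) (s : Int)
    (hS : S.Nodup) (hP : (P.map Prod.fst).Nodup) :
    S.foldl (fun sc k => if (PySem.Dict.mk P).contains k
                         then sc + (PySem.Dict.mk P).getD k 0 else sc) s
      = s + ((P.filter (fun p => PySem.Set.contains S p.1)).map Prod.snd).sum := by
  induction S generalizing s with
  | nil => simp [PySem.Set.contains]
  | cons x S ih =>
    simp only [List.nodup_cons] at hS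
    rw [List.foldl_cons, ih _ hS.2]
    rw [pv_filter_sum, pv_filter_sum]
    have hsplit : ∀ p : String × Int,
        (if PySem.Set.contains (x :: S) p.1 then p.2 else 0)
          = (if p.1 = x then p.2 else 0) + (if PySem.Set.contains S p.1 then p.2 else 0) := by
      intro p
      by_cases h1 : p.1 = x
      · subst h1
        simp [PySem.Set.contains, hS.1]
      · simp [PySem.Set.contains, h1]
    calc (if (PySem.Dict.mk P).contains x then s + (PySem.Dict.mk P).getD x 0 else s)
            + (P.map (fun p => if PySem.Set.contains S p.1 then p.2 else 0)).sum
        = s + (P.map (fun p => if p.1 = x then p.2 else 0)).sum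
            + (P.map (fun p => if PySem.Set.contains S p.1 then p.2 else 0)).sum := by
          rw [pv_sum_eq_key P x hP]; split_ifs <;> ring
      _ = s + (P.map (fun p => if PySem.Set.contains (x :: S) p.1 then p.2 else 0)).sum := by
          have : (P.map (fun p => if PySem.Set.contains (x :: S) p.1 then p.2 else 0))
              = (P.map (fun p => (if p.1 = x then p.2 else 0) + (if PySem.Set.contains S p.1 then p.2 else 0))) := by
            exact List.map_congr_left (fun p _ => hsplit p)
          rw [this, List.sum_map_add]; ring

-- B's accumulating fold over a table equals the starting score plus the filtered sum
lemma pv_foldl_if_add (P : List (String × Int)) (q : String × Int → Bool) (s : Int) :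
    P.foldl (fun sc p => if q p then sc + p.2 else sc) s
      = s + ((P.filter q).map Prod.snd).sum := by
  induction P generalizing s with
  | nil => simp
  | cons a P ih =>
    by_cases h : q a <;> simp [h, ih] <;> ring

-- a string is one of the length-n slices of s iff it has length n and occurs in s
lemma pv_mem_ngrams (s : String) (n : Nat) (hn : 0 < n) (x : String) :
    (x ∈ (PySem.List.pyRange 0 ((PySem.Str.len s : Int) - (n : Int) + 1) 1).map
        (fun i => PySem.Str.slice s (some i) (some (i + (n : Int)))))
      ↔ (x.toList.length = n ∧ PySem.Str.isIn x s = true) := by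
  have hL : (PySem.Str.len s) = s.length := by simp [PySem.Str.len, String.length_toList]
  constructor
  · intro hmem
    rw [List.mem_map] at hmem
    obtain ⟨i, hi, hx⟩ := hmem
    rw [PySem.List.mem_pyRange_one] at hi
    obtain ⟨k, rfl⟩ : ∃ k : Nat, i = (k : Int) := ⟨i.toNat, (Int.toNat_of_nonneg hi.1).symm⟩
    have hkn : k + n ≤ s.length := by
      have h2 := hi.2
      rw [hL] at h2
      omega
    have hxl : x.toList = (s.toList.drop k).take n := by
      rw [← hx, PySem.Str.toList_slice, PySem.Chars.slice_eq_listSlice,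
        PySem.List.slice_natCast_add]
    constructor
    · rw [hxl]
      simp
      omega
    · rw [PySem.Str.isIn_eq]
      rw [← PySem.Chars.exists_prefix_drop_iff_isIn]
      exact ⟨k, by rw [hxl]; exact List.take_prefix _ _⟩
  · rintro ⟨hlenx, hin⟩
    rw [PySem.Str.isIn_eq, ← PySem.Chars.exists_prefix_drop_iff_isIn] at hin
    obtain ⟨j, hpre⟩ := hin
    have hjn : j + n ≤ s.length := by
      have := hpre.length_le
      rw [hlenx] at this
      simp at this
      omega
    rw [List.mem_map]
    refine ⟨(j : Int), ?_, ?_⟩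
    · rw [PySem.List.mem_pyRange_one, hL]
      constructor
      · exact Int.natCast_nonneg j
      · omega
    · apply String.toList_inj.mp
      rw [PySem.Str.toList_slice, PySem.Chars.slice_eq_listSlice,
        PySem.List.slice_natCast_add]
      have := List.prefix_iff_eq_take.mp hpre
      rw [hlenx] at this
      exact this.symm

-- the table-filter predicates of A (membership in the ngram set) and B (length + substring) agree
lemma pv_pred_eq (s : String) (n : Nat) (hn : 0 < n) (x : String) :
    PySem.Set.contains
      (PySem.Set.ofList ((PySem.List.pyRange 0 ((PySem.Str.len s : Int) - (n : Int) + 1) 1).map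
        (fun i => PySem.Str.slice s (some i) (some (i + (n : Int)))))) x
      = ((PySem.Str.len x == n) && PySem.Str.isIn x s) := by
  rw [Bool.eq_iff_iff]
  rw [PySem.Set.contains_iff, PySem.Set.mem_ofList, pv_mem_ngrams s n hn x]
  simp [PySem.Str.len]

lemma pv_pred_eq2 (s x : String) :
    PySem.Set.contains
      (PySem.Set.ofList ((PySem.List.pyRange 0 ((PySem.Str.len s : Int) - 2 + 1) 1).map
        (fun i => PySem.Str.slice s (some i) (some (i + 2))))) x
      = ((PySem.Str.len x == 2) && PySem.Str.isIn x s) := by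
  simpa using pv_pred_eq s 2 (by norm_num) x

lemma pv_pred_eq3 (s x : String) :
    PySem.Set.contains
      (PySem.Set.ofList ((PySem.List.pyRange 0 ((PySem.Str.len s : Int) - 3 + 1) 1).map
        (fun i => PySem.Str.slice s (some i) (some (i + 3))))) x
      = ((PySem.Str.len x == 3) && PySem.Str.isIn x s) := by
  simpa using pv_pred_eq s 3 (by norm_num) x

-- ===== VERDICT (by name: the statement is the Claim_ definition above) =====
theorem score_decrypted_text_spec : Claim_equal_score_decrypted_text := by
  intro t kw bf tf _hdom hpre
  obtain ⟨hbf, htf⟩ := hpre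
  unfold Spec_score_decrypted_text score_decrypted_text score_decrypted_text_alt pvCountNgrams
  simp only []
  rw [PySem.Dict.keys_counter, PySem.Dict.keys_counter]
  rw [pv_main _ _ _ (PySem.Set.nodup_ofList _) hbf,
      pv_main _ _ _ (PySem.Set.nodup_ofList _) htf]
  rw [PySem.List.foldl_if_add_one]
  rw [pv_foldl_if_add, pv_foldl_if_add]
  simp only [pv_pred_eq2, pv_pred_eq3]
  ring
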